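-- pv_equiv track=rewrite | github.com/hazard-web/new_repo | main.py | count_reachable_arrays
-- ===== SOURCE A (Python) =====
-- MOD = 998244353
--
-- def count_reachable_arrays(t, test_cases):
--     results = []
--
--     for i in range(t):
--         n, p = test_cases[i]
--
--
--         result = 1
--
--
--         stack = []
--
--
--         for j in range(n):
--             while stack and p[j] < p[stack[-1]]:
--
--                 stack.pop()
--
--             if stack:
--
--                 result = (result * (j - stack[-1] + 1)) % MOD
--             else:
--
--                 result = (result * (j + 1)) % MOD
--
--
--             stack.append(j)
--
--         results.append(result)
--
--     return results
-- ===== SOURCE B (Python) =====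
-- MOD = 998244353
--
-- def count_reachable_arrays(t, test_cases):
--     def solve(case):
--         n, p = case
--         result = 1
--         for j in range(n):
--             # brute backward scan for the nearest previous index k with p[k] <= p[j]
--             k = j - 1
--             while k >= 0 and p[k] > p[j]:
--                 k -= 1
--             factor = (j - k + 1) if k >= 0 else (j + 1)
--             result = (result * factor) % MOD
--         return result
--
--     return [solve(test_cases[i]) for i in range(t)]
-- ===== Notes on version B (the rewrite author's own statement) =====
-- stated objective: simpler
-- what changed: Replaces the monotonic stack (push/pop of indices) by a direct backward scan: for each j it walks k = j-1, j-2, ... to the nearest previous index with p[k] <= p[j], so no stack state is carried between iterations; per-case results are collected with a comprehension.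
import Mathlib
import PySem

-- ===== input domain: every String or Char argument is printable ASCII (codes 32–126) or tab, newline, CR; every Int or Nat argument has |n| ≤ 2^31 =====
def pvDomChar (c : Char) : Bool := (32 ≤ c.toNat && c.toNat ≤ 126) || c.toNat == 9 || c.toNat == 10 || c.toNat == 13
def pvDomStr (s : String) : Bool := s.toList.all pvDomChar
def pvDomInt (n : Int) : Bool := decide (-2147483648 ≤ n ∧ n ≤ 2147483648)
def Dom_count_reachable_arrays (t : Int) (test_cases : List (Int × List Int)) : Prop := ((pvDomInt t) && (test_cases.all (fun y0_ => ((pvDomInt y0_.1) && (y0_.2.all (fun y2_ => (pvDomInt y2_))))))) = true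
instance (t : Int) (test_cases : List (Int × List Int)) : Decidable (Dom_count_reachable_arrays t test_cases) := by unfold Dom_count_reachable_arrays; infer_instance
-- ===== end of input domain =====

-- B replaces A's monotonic stack by a per-index backward scan (no stack state); simpler, not faster.

def pvMOD : Int := 998244353

-- ===== PORT A =====
-- the inner `while stack and p[j] < p[stack[-1]]: stack.pop()` loop; stack top at head
def pvPopLoop (p : List Int) (pj : Int) : List Nat → List Nat
  | [] => []
  | s :: rest => if pj < PySem.List.pyGetD p (s : Int) 0 then pvPopLoop p pj rest else s :: rest

-- one iteration of A's `for j in range(n)` loop over the state (result, stack)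
def pvStepA (p : List Int) (state : Int × List Nat) (j : Nat) : Int × List Nat :=
  let pj := PySem.List.pyGetD p (j : Int) 0
  let st := pvPopLoop p pj state.2
  let f : Int := match st with
    | [] => (j : Int) + 1
    | s :: _ => (j : Int) - (s : Int) + 1
  (PySem.Int.mod (state.1 * f) pvMOD, j :: st)

def pvCaseA (c : Int × List Int) : Int :=
  ((List.range c.1.toNat).foldl (pvStepA c.2) (1, [])).1

def count_reachable_arrays (t : Int) (test_cases : List (Int × List Int)) : List Int :=
  (List.range t.toNat).foldl
    (fun results i => results ++ [pvCaseA (PySem.List.pyGetD test_cases (i : Int) (0, []))]) []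

-- ===== PORT B =====
-- B's `k = j - 1; while k >= 0 and p[k] > p[j]: k -= 1`, called with fuel j (current index = fuel - 1)
def pvFindPrev (p : List Int) (pj : Int) : Nat → Int
  | 0 => -1
  | k + 1 => if PySem.List.pyGetD p (k : Int) 0 > pj then pvFindPrev p pj k else (k : Int)

def pvCaseB (c : Int × List Int) : Int :=
  (List.range c.1.toNat).foldl
    (fun r (j : Nat) =>
      let k := pvFindPrev c.2 (PySem.List.pyGetD c.2 (j : Int) 0) j
      PySem.Int.mod (r * (if 0 ≤ k then (j : Int) - k + 1 else (j : Int) + 1)) pvMOD) 1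

def count_reachable_arrays_alt (t : Int) (test_cases : List (Int × List Int)) : List Int :=
  (List.range t.toNat).map (fun i => pvCaseB (PySem.List.pyGetD test_cases (i : Int) (0, [])))

-- ===== PRECONDITION & SPEC =====
-- Pre_ excludes exactly the inputs where A raises an IndexError: t beyond len(test_cases),
-- or a processed case whose declared n exceeds len(p).
def Pre_count_reachable_arrays (t : Int) (test_cases : List (Int × List Int)) : Prop :=
  t ≤ (test_cases.length : Int) ∧
    ∀ c ∈ test_cases.take t.toNat, c.1 ≤ (c.2.length : Int)
instance (t : Int) (test_cases : List (Int × List Int)) : Decidable (Pre_count_reachable_arrays t test_cases) := by unfold Pre_count_reachable_arrays; infer_instance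

def pvWitness_count_reachable_arrays : Int × (List (Int × List Int)) :=
  (2, [(3, [2, 1, 2]), (0, [])])

def Spec_count_reachable_arrays (t : Int) (test_cases : List (Int × List Int)) (out : List Int) : Prop := out = count_reachable_arrays_alt t test_cases
instance (t : Int) (test_cases : List (Int × List Int)) (out : List Int) : Decidable (Spec_count_reachable_arrays t test_cases out) := by unfold Spec_count_reachable_arrays; infer_instance

-- ===== CLAIM (what is proved, stated in full; the proofs are below) =====
def Claim_equal_count_reachable_arrays : Prop := ∀ (t : Int) (test_cases : List (Int × List Int)), Dom_count_reachable_arrays t test_cases → Pre_count_reachable_arrays t test_cases → Spec_count_reachable_arrays t test_cases (count_reachable_arrays t test_cases)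

-- ===== LEMMAS AND PROOFS =====

-- the stack contents after processing indices 0..n-1
def pvStk (p : List Int) : Nat → List Nat
  | 0 => []
  | j + 1 => j :: pvPopLoop p (PySem.List.pyGetD p (j : Int) 0) (pvStk p j)

lemma pvPopLoop_popLoop (p : List Int) (pj pa : Int) (h : pj ≤ pa) :
    ∀ st, pvPopLoop p pj (pvPopLoop p pa st) = pvPopLoop p pj st := by
  intro st
  induction st with
  | nil => rfl
  | cons s rest ih =>
    simp only [pvPopLoop]
    split_ifs with hA hj hj
    · exact ih
    · exact absurd (lt_of_le_of_lt h hA) hj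
    · simp only [pvPopLoop, if_pos hj]
    · simp only [pvPopLoop, if_neg hj]

def pvHeadK : List Nat → Int
  | [] => -1
  | s :: _ => (s : Int)

lemma pvHead_pop_eq_findPrev (p : List Int) :
    ∀ j pj, pvHeadK (pvPopLoop p pj (pvStk p j)) = pvFindPrev p pj j := by
  intro j
  induction j with
  | zero => intro pj; rfl
  | succ j ih =>
    intro pj
    by_cases h : pj < PySem.List.pyGetD p (j : Int) 0
    · have hle : pj ≤ PySem.List.pyGetD p (j : Int) 0 := le_of_lt h
      simp only [pvStk, pvPopLoop, pvFindPrev, if_pos h,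
        pvPopLoop_popLoop p pj _ hle, ih]
    · simp only [pvStk, pvPopLoop, pvFindPrev, if_neg h, pvHeadK]

lemma pvFoldA_eq (p : List Int) : ∀ n : Nat,
    (List.range n).foldl (pvStepA p) (1, []) =
      ((List.range n).foldl
        (fun r (j : Nat) =>
          let k := pvFindPrev p (PySem.List.pyGetD p (j : Int) 0) j
          PySem.Int.mod (r * (if 0 ≤ k then (j : Int) - k + 1 else (j : Int) + 1)) pvMOD) 1,
       pvStk p n) := by
  intro n
  induction n with
  | zero => rfl
  | succ n ih =>
    rw [List.range_succ, List.foldl_append, List.foldl_append, ih]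
    simp only [List.foldl_cons, List.foldl_nil, pvStepA, pvStk]
    set pj := PySem.List.pyGetD p (n : Int) 0 with hpj
    have hk : pvHeadK (pvPopLoop p pj (pvStk p n)) = pvFindPrev p pj n :=
      pvHead_pop_eq_findPrev p n pj
    cases hst : pvPopLoop p pj (pvStk p n) with
    | nil =>
      rw [hst] at hk
      simp only [pvHeadK] at hk
      rw [← hk]
      norm_num
    | cons s rest =>
      rw [hst] at hk
      simp only [pvHeadK] at hk
      rw [← hk]
      have : (0 : Int) ≤ (s : Int) := Int.natCast_nonneg s
      simp [this]

lemma pvCase_eq (c : Int × List Int) : pvCaseA c = pvCaseB c := by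
  unfold pvCaseA pvCaseB
  rw [pvFoldA_eq]

lemma pvFoldl_append_map {α β : Type} (f : α → β) :
    ∀ (l : List α) (acc : List β),
      l.foldl (fun rs i => rs ++ [f i]) acc = acc ++ l.map f := by
  intro l
  induction l with
  | nil => intro acc; simp
  | cons x xs ih => intro acc; simp [ih]

-- ===== VERDICT (by name: the statement is the Claim_ definition above) =====
theorem count_reachable_arrays_spec : Claim_equal_count_reachable_arrays := by
  intro t test_cases _ _
  unfold Spec_count_reachable_arrays count_reachable_arrays count_reachable_arrays_alt
  rw [pvFoldl_append_map]
  simp [pvCase_eq]
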